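-- pv_equiv track=rewrite | github.com/Radcliffe/OEIS-Python | src/oeispy/A262/A262069.py | palgen
-- ===== SOURCE A (Python) =====
-- def palgen(l,b=10): # generator of palindromes in base b of length <= 2*l
--     if l > 0:
--         yield 0
--         for x in range(1,l+1):
--             n = b**(x-1)
--             n2 = n*b
--             for y in range(n,n2):
--                 k, m = y//b, 0
--                 while k >= b:
--                     k, r = divmod(k,b)
--                     m = b*m + r
--                 yield y*n + b*m + k
--             for y in range(n,n2):
--                 k, m = y, 0
--                 while k >= b:
--                     k, r = divmod(k,b)
--                     m = b*m + r
--                 yield y*n2 + b*m + k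
-- ===== SOURCE B (Python) =====
-- def palgen(l, b=10):
--     # generate palindromes in base b of length <= 2*l, length by length,
--     # building each from its digit-list prefix
--     if l > 0:
--         yield 0
--         for L in range(1, 2*l + 1):
--             half = (L + 1) // 2
--             for y in range(b**(half - 1), b**half):
--                 ds = _digits(y, b)
--                 pal = ds + (ds[:-1][::-1] if L % 2 else ds[::-1])
--                 v = 0
--                 for d in pal:
--                     v = v * b + d
--                 yield v
--
-- def _digits(y, b):
--     return [y] if y < b else _digits(y // b, b) + [y % b]
-- ===== Notes on version B (the rewrite author's own statement) =====
-- stated objective: simpler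
-- what changed: Replaces A's two parity-split inner loops with arithmetic divmod reversal by a single loop over total palindrome length L, building each palindrome as an explicit base-b digit list (prefix ++ mirrored prefix) and folding it back to an integer; emission order is preserved.
import Mathlib
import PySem

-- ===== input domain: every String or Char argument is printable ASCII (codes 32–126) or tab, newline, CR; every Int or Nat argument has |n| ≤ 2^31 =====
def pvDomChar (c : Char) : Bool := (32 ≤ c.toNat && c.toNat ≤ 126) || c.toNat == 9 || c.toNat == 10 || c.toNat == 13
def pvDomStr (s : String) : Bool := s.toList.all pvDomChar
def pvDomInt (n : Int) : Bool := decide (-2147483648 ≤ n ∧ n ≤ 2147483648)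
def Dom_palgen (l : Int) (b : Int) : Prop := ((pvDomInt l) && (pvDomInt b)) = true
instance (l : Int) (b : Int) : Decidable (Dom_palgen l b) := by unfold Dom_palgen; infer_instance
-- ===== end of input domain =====

-- B restructures A's two parity-split inner loops into a single length-indexed loop
-- over digit-list prefixes (objective: simpler); return value only (both are generators).

-- ===== PORT A =====
-- A's inner `while k >= b` loop; fuel k.natAbs+1 is sufficient (each pass divides k by b ≥ 2;
-- for b ≤ 1 the surrounding ranges are empty, so the loop is never entered on admitted inputs)
def palgenWhile (b : Int) : Nat → Int → Int → Int × Int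
  | 0, k, m => (k, m)
  | fuel+1, k, m =>
    if b ≤ k then
      palgenWhile b fuel (PySem.Int.floordiv k b) (b * m + PySem.Int.mod k b)
    else (k, m)

def palgen (l : Int) (b : Int) : List Int :=
  if l > 0 then
    0 :: (PySem.List.pyRange 1 (l+1) 1).flatMap (fun x =>
      let n : Int := b ^ (x - 1).toNat   -- b**(x-1); x ≥ 1 so the exponent is a Nat
      let n2 : Int := n * b
      ((PySem.List.pyRange n n2 1).map (fun y =>
        y * n + b * (palgenWhile b ((PySem.Int.floordiv y b).natAbs + 1) (PySem.Int.floordiv y b) 0).2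
          + (palgenWhile b ((PySem.Int.floordiv y b).natAbs + 1) (PySem.Int.floordiv y b) 0).1))
      ++ ((PySem.List.pyRange n n2 1).map (fun y =>
        y * n2 + b * (palgenWhile b (y.natAbs + 1) y 0).2 + (palgenWhile b (y.natAbs + 1) y 0).1)))
  else []

-- ===== PORT B =====
-- Source B's recursive `_digits`; fuel y.natAbs+1 is sufficient (b ≥ 2 whenever it is called)
def palDigits (b : Int) : Nat → Int → List Int
  | 0, y => [y]
  | fuel+1, y =>
    if y < b then [y]
    else palDigits b fuel (PySem.Int.floordiv y b) ++ [PySem.Int.mod y b]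

def palgen_alt (l : Int) (b : Int) : List Int :=
  if l > 0 then
    0 :: (PySem.List.pyRange 1 (2*l+1) 1).flatMap (fun L =>
      let half : Int := PySem.Int.floordiv (L+1) 2
      (PySem.List.pyRange (b ^ (half-1).toNat) (b ^ half.toNat) 1).map (fun y =>
        let ds := palDigits b (y.natAbs + 1) y
        -- ds[:-1][::-1] = ds.dropLast.reverse, ds[::-1] = ds.reverse (exact)
        let pal := ds ++ (if PySem.Int.mod L 2 ≠ 0 then ds.dropLast.reverse else ds.reverse)
        pal.foldl (fun v d => v * b + d) 0))
  else []

-- ===== PRECONDITION & SPEC =====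
-- Pre_ excludes b < 0 with l ≥ 2: there A's `while k >= b` loop never terminates
-- (Python hangs, no value is returned), and B's recursive _digits likewise fails to return.
def Pre_palgen (l : Int) (b : Int) : Prop := 0 ≤ b ∨ l ≤ 1
instance (l : Int) (b : Int) : Decidable (Pre_palgen l b) := by unfold Pre_palgen; infer_instance
def pvWitness_palgen : Int × Int := (2, 10)

def Spec_palgen (l : Int) (b : Int) (out : List Int) : Prop := out = palgen_alt l b
instance (l : Int) (b : Int) (out : List Int) : Decidable (Spec_palgen l b out) := by unfold Spec_palgen; infer_instance

-- ===== CLAIM (what is proved, stated in full; the proofs are below) =====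
def Claim_equal_palgen : Prop := ∀ (l : Int) (b : Int), Dom_palgen l b → Pre_palgen l b → Spec_palgen l b (palgen l b)

-- ===== LEMMAS AND PROOFS =====

lemma pal_fdiv_shrink (b k : Int) (hb : 2 ≤ b) (hk : b ≤ k) :
    1 ≤ PySem.Int.floordiv k b ∧ PySem.Int.floordiv k b < k := by
  constructor
  · rw [PySem.Int.le_floordiv_iff_mul_le (by omega)]; omega
  · rw [PySem.Int.floordiv_lt_iff_lt_mul (by omega)]; nlinarith

lemma palDigits_lt (b k : Int) (h : k < b) : ∀ f, palDigits b f k = [k] := by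
  intro f; cases f <;> simp [palDigits, h]

lemma palDigits_ne_nil (b : Int) : ∀ f y, palDigits b f y ≠ [] := by
  intro f y; cases f with
  | zero => simp [palDigits]
  | succ f => simp only [palDigits]; split <;> simp

-- fuel irrelevance of the digit list
lemma palDigits_fuel (b : Int) (hb : 2 ≤ b) :
    ∀ f1 f2 (k : Int), 0 ≤ k → k.natAbs ≤ f1 → k.natAbs ≤ f2 →
      palDigits b f1 k = palDigits b f2 k := by
  intro f1
  induction f1 using Nat.strong_induction_on with
  | _ f1 ih =>
    intro f2 k hk h1 h2
    by_cases hlt : k < b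
    · rw [palDigits_lt b k hlt, palDigits_lt b k hlt]
    · rw [not_lt] at hlt
      obtain ⟨hq1, hq2⟩ := pal_fdiv_shrink b k hb hlt
      have hq0 : 0 ≤ PySem.Int.floordiv k b := by omega
      have hqa : (PySem.Int.floordiv k b).natAbs < k.natAbs := by omega
      obtain ⟨f1', rfl⟩ : ∃ f1', f1 = f1' + 1 := ⟨f1 - 1, by omega⟩
      obtain ⟨f2', rfl⟩ : ∃ f2', f2 = f2' + 1 := ⟨f2 - 1, by omega⟩
      simp only [palDigits, if_neg (by omega : ¬ k < b)]
      rw [ih f1' (by omega) f2' _ hq0 (by omega) (by omega)]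

-- folding the digit list back gives the number (any b, any fuel)
lemma palDigits_fold (b : Int) :
    ∀ f (y : Int), (palDigits b f y).foldl (fun v d => v * b + d) 0 = y := by
  intro f
  induction f with
  | zero => intro y; simp [palDigits]
  | succ f ih =>
    intro y
    by_cases hlt : y < b
    · simp [palDigits, hlt]
    · simp only [palDigits, if_neg hlt, List.foldl_append, ih, List.foldl_cons, List.foldl_nil]
      exact PySem.Int.floordiv_mul_add_mod y b

-- shifting the initial accumulator of the fold
lemma pal_foldl_init (b : Int) :
    ∀ (xs : List Int) (a : Int),
      xs.foldl (fun v d => v * b + d) a = a * b ^ xs.length + xs.foldl (fun v d => v * b + d) 0 := by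
  intro xs
  induction xs with
  | nil => simp
  | cons x xs ih =>
    intro a
    simp only [List.foldl_cons, List.length_cons]
    rw [ih (a * b + x), ih (0 * b + x)]
    ring

-- y with b^j ≤ y < b^(j+1) has j+1 digits
lemma palDigits_length (b : Int) (hb : 2 ≤ b) :
    ∀ j f (y : Int), b ^ j ≤ y → y < b ^ (j+1) → y.natAbs ≤ f →
      (palDigits b f y).length = j + 1 := by
  intro j
  induction j with
  | zero =>
    intro f y h1 h2 hf
    rw [palDigits_lt b y (by simpa using h2)]
    simp
  | succ j ih =>
    intro f y h1 h2 hf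
    have hby : b ≤ y := le_trans (le_self_pow₀ (by omega) (by omega)) h1
    obtain ⟨hq1, hq2⟩ := pal_fdiv_shrink b y hb hby
    obtain ⟨f', rfl⟩ : ∃ f', f = f' + 1 := ⟨f - 1, by omega⟩
    simp only [palDigits, if_neg (by omega : ¬ y < b), List.length_append, List.length_cons,
      List.length_nil]
    rw [ih f' (PySem.Int.floordiv y b) ?_ ?_ (by omega)]
    · rw [PySem.Int.le_floordiv_iff_mul_le (by omega)]
      calc b ^ j * b = b ^ (j+1) := by ring
        _ ≤ y := h1
    · rw [PySem.Int.floordiv_lt_iff_lt_mul (by omega)]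
      calc y < b ^ (j+1+1) := h2
        _ = b ^ (j+1) * b := by ring

-- A's while loop, expressed through B's digit list
lemma palgenWhile_eq (b : Int) (hb : 2 ≤ b) :
    ∀ f (k m : Int), 0 ≤ k → k.natAbs ≤ f →
      palgenWhile b (f+1) k m =
        ((palDigits b f k).headI,
         ((palDigits b f k).tail.reverse).foldl (fun v d => v * b + d) m) := by
  intro f
  induction f using Nat.strong_induction_on with
  | _ f ih =>
    intro k m hk hf
    by_cases hlt : k < b
    · rw [palDigits_lt b k hlt]
      simp [palgenWhile, if_neg (by omega : ¬ b ≤ k)]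
    · rw [not_lt] at hlt
      obtain ⟨hq1, hq2⟩ := pal_fdiv_shrink b k hb hlt
      obtain ⟨f', rfl⟩ : ∃ f', f = f' + 1 := ⟨f - 1, by omega⟩
      have hne := palDigits_ne_nil b f' (PySem.Int.floordiv k b)
      obtain ⟨d, t, hD⟩ := List.exists_cons_of_ne_nil hne
      rw [show palgenWhile b (f'+1+1) k m = palgenWhile b (f'+1) (PySem.Int.floordiv k b)
            (b * m + PySem.Int.mod k b) by simp [palgenWhile, if_pos hlt]]
      rw [ih f' (by omega) (PySem.Int.floordiv k b) (b * m + PySem.Int.mod k b) (by omega) (by omega)]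
      rw [show palDigits b (f'+1) k = palDigits b f' (PySem.Int.floordiv k b) ++ [PySem.Int.mod k b]
            by simp [palDigits, if_neg (by omega : ¬ k < b)]]
      rw [hD]
      simp [mul_comm]

-- the even-length palindrome built by A from y equals B's digit-list fold
lemma pal_even_point (b : Int) (hb : 2 ≤ b) (j : Nat) (y : Int)
    (h1 : b ^ j ≤ y) (h2 : y < b ^ (j+1)) :
    y * (b ^ j * b) + b * (palgenWhile b (y.natAbs + 1) y 0).2
        + (palgenWhile b (y.natAbs + 1) y 0).1
      = ((palDigits b (y.natAbs + 1) y) ++ (palDigits b (y.natAbs + 1) y).reverse).foldl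
          (fun v d => v * b + d) 0 := by
  have hy1 : 1 ≤ y := le_trans (one_le_pow₀ (by omega)) h1
  have hfuel : palDigits b (y.natAbs + 1) y = palDigits b y.natAbs y :=
    palDigits_fuel b hb (y.natAbs + 1) y.natAbs y (by omega) (by omega) (by omega)
  have hfold : (palDigits b y.natAbs y).foldl (fun v d => v * b + d) 0 = y :=
    palDigits_fold b y.natAbs y
  have hlen : (palDigits b y.natAbs y).length = j + 1 :=
    palDigits_length b hb j y.natAbs y h1 h2 (by omega)
  obtain ⟨d, t, hD⟩ := List.exists_cons_of_ne_nil (palDigits_ne_nil b y.natAbs y)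
  have htlen : t.length = j := by
    have := hlen; rw [hD] at this; simpa using this
  rw [hfuel, palgenWhile_eq b hb y.natAbs y 0 (by omega) (by omega)]
  rw [List.foldl_append, hfold, hD]
  simp only [List.headI_cons, List.tail_cons, List.reverse_cons, List.foldl_append,
    List.foldl_cons, List.foldl_nil]
  rw [pal_foldl_init b t.reverse y, pal_foldl_init b t.reverse 0]
  simp only [List.length_reverse, htlen]
  ring
-- the odd-length palindrome built by A from y equals B's digit-list fold
lemma pal_odd_point (b : Int) (hb : 2 ≤ b) (j : Nat) (y : Int)
    (h1 : b ^ j ≤ y) (h2 : y < b ^ (j+1)) :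
    y * b ^ j + b * (palgenWhile b ((PySem.Int.floordiv y b).natAbs + 1) (PySem.Int.floordiv y b) 0).2
        + (palgenWhile b ((PySem.Int.floordiv y b).natAbs + 1) (PySem.Int.floordiv y b) 0).1
      = ((palDigits b (y.natAbs + 1) y) ++ (palDigits b (y.natAbs + 1) y).dropLast.reverse).foldl
          (fun v d => v * b + d) 0 := by
  have hy1 : 1 ≤ y := le_trans (one_le_pow₀ (by omega)) h1
  cases j with
  | zero =>
    have hyb : y < b := by simpa using h2
    have hq : PySem.Int.floordiv y b = 0 := by
      rw [PySem.Int.floordiv_eq_iff_of_pos (by omega)]; omega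
    rw [hq, palDigits_lt b y hyb]
    simp [palgenWhile, if_neg (show ¬ b ≤ (0:Int) by omega)]
  | succ j =>
    have hby : b ≤ y := le_trans (le_self_pow₀ (by omega) (by omega)) h1
    obtain ⟨hq1, hq2⟩ := pal_fdiv_shrink b y hb hby
    set q := PySem.Int.floordiv y b with hqdef
    have hqlo : b ^ j ≤ q := by
      rw [hqdef, PySem.Int.le_floordiv_iff_mul_le (by omega)]
      calc b ^ j * b = b ^ (j+1) := by ring
        _ ≤ y := h1
    have hqhi : q < b ^ (j+1) := by
      rw [hqdef, PySem.Int.floordiv_lt_iff_lt_mul (by omega)]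
      calc y < b ^ (j+1+1) := h2
        _ = b ^ (j+1) * b := by ring
    have hds : palDigits b (y.natAbs + 1) y = palDigits b q.natAbs q ++ [PySem.Int.mod y b] := by
      rw [show palDigits b (y.natAbs + 1) y
            = palDigits b y.natAbs q ++ [PySem.Int.mod y b]
          by simp [palDigits, if_neg (show ¬ y < b by omega), hqdef]]
      rw [palDigits_fuel b hb y.natAbs q.natAbs q (by omega) (by omega) (by omega)]
    have hfold : (palDigits b q.natAbs q ++ [PySem.Int.mod y b]).foldl (fun v d => v * b + d) 0 = y := by
      rw [← hds]; exact palDigits_fold b (y.natAbs + 1) y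
    have hlen : (palDigits b q.natAbs q).length = j + 1 :=
      palDigits_length b hb j q.natAbs q hqlo hqhi (by omega)
    obtain ⟨d, t, hD⟩ := List.exists_cons_of_ne_nil (palDigits_ne_nil b q.natAbs q)
    have htlen : t.length = j := by
      have := hlen; rw [hD] at this; simpa using this
    rw [palgenWhile_eq b hb q.natAbs q 0 (by omega) (by omega)]
    rw [hds, List.dropLast_concat, List.foldl_append, hfold, hD]
    simp only [List.headI_cons, List.tail_cons, List.reverse_cons, List.foldl_append,
      List.foldl_cons, List.foldl_nil]
    rw [pal_foldl_init b t.reverse y, pal_foldl_init b t.reverse 0]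
    simp only [List.length_reverse, htlen]
    ring
-- splitting range(1, 2m+1) into pairs (2x-1, 2x) for x in range(1, m+1)
lemma pal_double_range : ∀ (m : Nat),
    PySem.List.pyRange 1 (2*(m:Int)+1) 1
      = (PySem.List.pyRange 1 ((m:Int)+1) 1).flatMap (fun x => [2*x - 1, 2*x]) := by
  intro m
  induction m with
  | zero =>
    simp [PySem.List.pyRange_one_eq_nil]
  | succ m ih =>
    push_cast
    rw [show (2:Int)*(m+1)+1 = (2*m+2)+1 by ring,
        PySem.List.pyRange_one_succ_right (by omega : (1:Int) ≤ 2*m+2),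
        show (2:Int)*m+2 = (2*m+1)+1 by ring,
        PySem.List.pyRange_one_succ_right (by omega : (1:Int) ≤ 2*m+1),
        PySem.List.pyRange_one_succ_right (by omega : (1:Int) ≤ m+1)]
    rw [List.flatMap_append, ← ih]
    simp only [List.flatMap_cons, List.flatMap_nil, List.append_nil, List.append_assoc]
    norm_num
    constructor <;> ring
-- ===== VERDICT (by name: the statement is the Claim_ definition above) =====
theorem palgen_spec : Claim_equal_palgen := by
  intro l b hdom hpre
  unfold Spec_palgen
  by_cases hl : l > 0
  · simp only [palgen, palgen_alt, if_pos hl]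
    congr 1
    by_cases hb2 : 2 ≤ b
    · -- b ≥ 2 : genuine palindrome generation
      obtain ⟨m, hm⟩ : ∃ m : Nat, l = (m:Int) := ⟨l.toNat, by omega⟩
      subst hm
      rw [pal_double_range m, List.flatMap_assoc]
      rw [List.flatMap_def, List.flatMap_def]
      congr 1
      apply List.map_congr_left
      intro x hx
      rw [PySem.List.mem_pyRange_one] at hx
      have hxt : x.toNat = (x-1).toNat + 1 := by omega
      have half1 : PySem.Int.floordiv (2*x - 1 + 1) 2 = x := by
        rw [PySem.Int.floordiv_eq_iff_of_pos (by omega)]; omega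
      have half2 : PySem.Int.floordiv (2*x + 1) 2 = x := by
        rw [PySem.Int.floordiv_eq_iff_of_pos (by omega)]; omega
      have mod1 : PySem.Int.mod (2*x - 1) 2 ≠ 0 := by
        rw [PySem.Int.mod_eq_emod_of_pos (by omega)]; omega
      have mod2 : PySem.Int.mod (2*x) 2 = 0 := by
        rw [PySem.Int.mod_eq_emod_of_pos (by omega)]; omega
      simp only [List.flatMap_cons, List.flatMap_nil, List.append_nil, half1, half2,
        mod1, mod2, ne_eq, not_false_eq_true, not_true_eq_false, if_pos, if_neg,
        hxt, pow_succ]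
      congr 1
      · -- odd block
        apply List.map_congr_left
        intro y hy
        rw [PySem.List.mem_pyRange_one] at hy
        exact pal_odd_point b hb2 (x-1).toNat y hy.1 (by rw [pow_succ]; exact hy.2)
      · -- even block
        apply List.map_congr_left
        intro y hy
        rw [PySem.List.mem_pyRange_one] at hy
        exact pal_even_point b hb2 (x-1).toNat y hy.1 (by rw [pow_succ]; exact hy.2)
    · -- b ≤ 1 (or b < 0 with l = 1): every inner range is empty
      refine Eq.trans (List.flatMap_eq_nil_iff.mpr ?_) (Eq.symm (List.flatMap_eq_nil_iff.mpr ?_))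
      · intro x hx
        rw [PySem.List.mem_pyRange_one] at hx
        have hempty : b ^ ((x-1).toNat) * b ≤ b ^ ((x-1).toNat) := by
          rcases (show b = 0 ∨ b = 1 ∨ b < 0 by omega) with h0 | h1 | hn
          · subst h0; simp
          · subst h1; simp
          · have hx1 : x = 1 := by rcases hpre with h | h <;> omega
            subst hx1; simp; omega
        rw [PySem.List.pyRange_one_eq_nil hempty]
        simp
      · intro L hL
        rw [PySem.List.mem_pyRange_one] at hL
        have hhalf : 1 ≤ PySem.Int.floordiv (L+1) 2 := by
          rw [PySem.Int.le_floordiv_iff_mul_le (by omega)]; omega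
        have ht : (PySem.Int.floordiv (L+1) 2).toNat
            = ((PySem.Int.floordiv (L+1) 2) - 1).toNat + 1 := by omega
        have hempty : b ^ (PySem.Int.floordiv (L+1) 2).toNat
            ≤ b ^ ((PySem.Int.floordiv (L+1) 2) - 1).toNat := by
          rcases (show b = 0 ∨ b = 1 ∨ b < 0 by omega) with h0 | h1 | hn
          · subst h0; rw [ht, pow_succ, mul_zero]; exact pow_nonneg le_rfl _
          · subst h1; simp
          · have hL2 : L ≤ 2 := by rcases hpre with h | h <;> omega
            have : PySem.Int.floordiv (L+1) 2 = 1 := by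
              rw [PySem.Int.floordiv_eq_iff_of_pos (by omega)]; omega
            rw [this]; simp; omega
        rw [PySem.List.pyRange_one_eq_nil hempty]
        simp
  · simp [palgen, palgen_alt, hl]
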